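-- pv_equiv track=rewrite | github.com/INTEGRITY2077/openyggdrasil | runtime/cultivation/provider_effort_vocabulary_normalization.py | normalize_effort_level
-- ===== SOURCE A (Python) =====
-- from typing import Any, Mapping
--
-- EFFORT_LEVEL_VALUES = {"unknown", "low", "medium", "high", "xhigh"}
--
-- LOW_EFFORT_TOKENS = {"low", "minimal", "small", "light", "cheap"}
--
-- MEDIUM_EFFORT_TOKENS = {"medium", "med", "normal", "standard", "balanced", "default"}
--
-- HIGH_EFFORT_TOKENS = {"high", "large", "deep", "hard", "provider_reported_high"}
--
-- XHIGH_EFFORT_TOKENS = {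
--     "xhigh",
--     "x_high",
--     "extra_high",
--     "extrahigh",
--     "very_high",
--     "max",
--     "maximum",
--     "provider_reported_xhigh",
-- }
--
-- def _token(value: Any) -> str:
--     return str(value or "").strip().lower().replace("-", "_").replace(" ", "_")
--
-- def normalize_effort_level(value: Any) -> str:
--     token = _token(value)
--     if token in EFFORT_LEVEL_VALUES:
--         return token
--     if token in LOW_EFFORT_TOKENS:
--         return "low"
--     if token in MEDIUM_EFFORT_TOKENS:
--         return "medium"
--     if token in HIGH_EFFORT_TOKENS:
--         return "high"
--     if token in XHIGH_EFFORT_TOKENS: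
--         return "xhigh"
--     if token.startswith("provider_reported_"):
--         return normalize_effort_level(token.removeprefix("provider_reported_"))
--     return "unknown"
-- ===== SOURCE B (Python) =====
-- _PREFIX = "provider_reported_"
--
-- # one table: every accepted token variant -> canonical level (identity rows for canonical values)
-- _CANON = {
--     "unknown": "unknown", "low": "low", "medium": "medium", "high": "high", "xhigh": "xhigh",
--     "minimal": "low", "small": "low", "light": "low", "cheap": "low",
--     "med": "medium", "normal": "medium", "standard": "medium", "balanced": "medium", "default": "medium",
--     "large": "high", "deep": "high", "hard": "high", "provider_reported_high": "high",
--     "x_high": "xhigh", "extra_high": "xhigh", "extrahigh": "xhigh", "very_high": "xhigh",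
--     "max": "xhigh", "maximum": "xhigh", "provider_reported_xhigh": "xhigh",
-- }
--
-- def _token(value):
--     return str(value or "").strip().lower().replace("-", "_").replace(" ", "_")
--
-- def normalize_effort_level(value):
--     token = _token(value)
--     while True:
--         hit = _CANON.get(token)
--         if hit is not None:
--             return hit
--         if not token.startswith(_PREFIX):
--             return "unknown"
--         # strip one reported-by-provider prefix and re-normalize the remainder
--         token = _token(token[len(_PREFIX):])
-- ===== Notes on version B (the rewrite author's own statement) =====
-- stated objective: simpler
-- what changed: Replaces the five ordered set-membership branches and the recursion by a single token->canonical-level table consulted in a loop that strips the provider-reported prefix.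
import Mathlib
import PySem

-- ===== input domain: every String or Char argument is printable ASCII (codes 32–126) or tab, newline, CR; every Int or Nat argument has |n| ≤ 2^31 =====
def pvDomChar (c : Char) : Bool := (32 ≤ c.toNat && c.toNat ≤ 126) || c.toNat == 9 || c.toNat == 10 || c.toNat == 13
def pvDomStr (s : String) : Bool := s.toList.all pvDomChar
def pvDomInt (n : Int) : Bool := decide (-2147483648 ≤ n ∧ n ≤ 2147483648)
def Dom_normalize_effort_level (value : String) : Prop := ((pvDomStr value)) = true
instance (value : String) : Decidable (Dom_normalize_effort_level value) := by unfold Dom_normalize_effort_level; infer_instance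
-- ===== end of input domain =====

-- B replaces A's five ordered membership branches + recursion by one token->level table
-- consulted in a prefix-stripping loop (objective: simpler); return values proved equal on all inputs.

-- ===== PORT A =====
-- _token(value) = str(value or "").strip().lower().replace("-","_").replace(" ","_")
-- ('value or ""' on a str is '' when value is empty, value otherwise; str() is the identity on str)
def pyToken (value : String) : String :=
  String.ofList
    (PySem.Chars.replace
      (PySem.Chars.replace
        (PySem.Chars.lower (PySem.Chars.strip (if value = "" then "" else value).toList))
        ['-'] ['_'])
      [' '] ['_'])

def EFFORT_LEVEL_VALUES : PySem.Set String :=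
  PySem.Set.ofList ["unknown", "low", "medium", "high", "xhigh"]
def LOW_EFFORT_TOKENS : PySem.Set String :=
  PySem.Set.ofList ["low", "minimal", "small", "light", "cheap"]
def MEDIUM_EFFORT_TOKENS : PySem.Set String :=
  PySem.Set.ofList ["medium", "med", "normal", "standard", "balanced", "default"]
def HIGH_EFFORT_TOKENS : PySem.Set String :=
  PySem.Set.ofList ["high", "large", "deep", "hard", "provider_reported_high"]
def XHIGH_EFFORT_TOKENS : PySem.Set String :=
  PySem.Set.ofList ["xhigh", "x_high", "extra_high", "extrahigh", "very_high", "max", "maximum",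
    "provider_reported_xhigh"]

-- length facts needed only for termination of the ports
theorem pyReplaceGo_single_length (a b : Char) :
    ∀ (fuel : Nat) (l acc : List Char),
      (PySem.Chars.replace.go [a] [b] fuel l acc).length = acc.length + l.length := by
  intro fuel
  induction fuel with
  | zero => intro l acc; simp [PySem.Chars.replace.go]
  | succ n ih =>
    intro l acc
    cases l with
    | nil => simp [PySem.Chars.replace.go]
    | cons c t =>
      rw [PySem.Chars.replace.go]
      split
      · rw [ih]; simp; omega
      · rw [ih]; simp; omega

theorem pyToken_length_le (value : String) : (pyToken value).toList.length ≤ value.toList.length := by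
  unfold pyToken
  rw [String.toList_ofList]
  unfold PySem.Chars.replace
  simp only [List.isEmpty_cons, if_false, Bool.false_eq_true]
  rw [pyReplaceGo_single_length, pyReplaceGo_single_length]
  simp only [List.length_nil, Nat.zero_add, PySem.Chars.lower, List.length_map]
  have h1 : (PySem.Chars.strip (if value = "" then "" else value).toList).length ≤
      (if value = "" then "" else value).toList.length := by
    unfold PySem.Chars.strip PySem.Chars.rstrip PySem.Chars.lstrip
    calc ((List.dropWhile PySem.Chars.isspace
            (List.dropWhile PySem.Chars.isspace (if value = "" then "" else value).toList).reverse).reverse).length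
        ≤ (List.dropWhile PySem.Chars.isspace (if value = "" then "" else value).toList).reverse.length := by
          rw [List.length_reverse]; exact List.length_dropWhile_le _ _
      _ ≤ _ := by rw [List.length_reverse]; exact List.length_dropWhile_le _ _
  by_cases hv : value = ""
  · simp [hv] at h1 ⊢; omega
  · simp only [hv, if_false] at h1 ⊢; omega

theorem startswith_len_le {s p : String} (h : PySem.Str.startswith s p = true) :
    p.toList.length ≤ s.toList.length := by
  have : p.toList <+: s.toList := by
    have := PySem.Chars.startswith_iff (s := s.toList) (p := p.toList) |>.mp (by simpa using h)
    exact this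
  exact this.length_le

def normalize_effort_level (value : String) : String :=
  let token := pyToken value
  if PySem.Set.contains EFFORT_LEVEL_VALUES token then token
  else if PySem.Set.contains LOW_EFFORT_TOKENS token then "low"
  else if PySem.Set.contains MEDIUM_EFFORT_TOKENS token then "medium"
  else if PySem.Set.contains HIGH_EFFORT_TOKENS token then "high"
  else if PySem.Set.contains XHIGH_EFFORT_TOKENS token then "xhigh"
  else if PySem.Str.startswith token "provider_reported_" then
    -- token.removeprefix("provider_reported_") under the startswith guard = drop 18 chars; exact here
    normalize_effort_level (String.ofList ((pyToken value).toList.drop 18))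
  else "unknown"
termination_by value.toList.length
decreasing_by
  simp only [String.toList_ofList, List.length_drop]
  have h2 : ("provider_reported_" : String).toList.length ≤ (pyToken value).toList.length :=
    startswith_len_le (s := pyToken value) (p := "provider_reported_")
      (by simp only [PySem.Str.startswith_eq]; exact ‹_›)
  have h1 := pyToken_length_le value
  have h3 : ("provider_reported_" : String).toList.length = 18 := by decide
  omega

-- ===== PORT B =====
def pvPrefix : String := "provider_reported_"

def pvCanon : PySem.Dict String String := PySem.Dict.mk
  [("unknown", "unknown"), ("low", "low"), ("medium", "medium"), ("high", "high"), ("xhigh", "xhigh"),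
   ("minimal", "low"), ("small", "low"), ("light", "low"), ("cheap", "low"),
   ("med", "medium"), ("normal", "medium"), ("standard", "medium"), ("balanced", "medium"),
   ("default", "medium"),
   ("large", "high"), ("deep", "high"), ("hard", "high"), ("provider_reported_high", "high"),
   ("x_high", "xhigh"), ("extra_high", "xhigh"), ("extrahigh", "xhigh"), ("very_high", "xhigh"),
   ("max", "xhigh"), ("maximum", "xhigh"), ("provider_reported_xhigh", "xhigh")]

-- the 'while True' loop of Source B, one iteration per recursive call
def pvLoop (token : String) : String :=
  match pvCanon.get? token with
  | some hit => hit
  | none =>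
    if PySem.Str.startswith token pvPrefix = false then "unknown"
    else
      -- token = _token(token[len(_PREFIX):]) ; len(_PREFIX) = 18
      pvLoop (pyToken (String.ofList (PySem.Chars.slice token.toList (some 18) none)))
termination_by token.toList.length
decreasing_by
  have h2 := startswith_len_le (s := token) (p := pvPrefix)
    (by simpa using ‹¬PySem.Str.startswith token pvPrefix = false›)
  have hs : PySem.Chars.slice token.toList (some 18) none = token.toList.drop ((18 : Int)).toNat := by
    unfold PySem.Chars.slice
    exact PySem.List.slice_from _ (by norm_num)
  rw [hs]
  have h1 := pyToken_length_le (String.ofList (token.toList.drop ((18 : Int)).toNat))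
  simp only [String.toList_ofList, List.length_drop] at h1 ⊢
  have h3 : pvPrefix.toList.length = 18 := by decide
  omega

def normalize_effort_level_alt (value : String) : String := pvLoop (pyToken value)

-- ===== PRECONDITION & SPEC =====
def Spec_normalize_effort_level (value : String) (out : String) : Prop := out = normalize_effort_level_alt value
instance (value : String) (out : String) : Decidable (Spec_normalize_effort_level value out) := by unfold Spec_normalize_effort_level; infer_instance

-- ===== CLAIM (what is proved, stated in full; the proofs are below) =====
def Claim_equal_normalize_effort_level : Prop := ∀ (value : String), Dom_normalize_effort_level value → Spec_normalize_effort_level value (normalize_effort_level value)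

-- ===== LEMMAS AND PROOFS =====

-- A's five ordered branches, as an Option-valued table probe
def branchRes (t : String) : Option String :=
  if PySem.Set.contains EFFORT_LEVEL_VALUES t then some t
  else if PySem.Set.contains LOW_EFFORT_TOKENS t then some "low"
  else if PySem.Set.contains MEDIUM_EFFORT_TOKENS t then some "medium"
  else if PySem.Set.contains HIGH_EFFORT_TOKENS t then some "high"
  else if PySem.Set.contains XHIGH_EFFORT_TOKENS t then some "xhigh"
  else none

theorem branchRes_eq_get? (t : String) : branchRes t = pvCanon.get? t := by
  by_cases h : t ∈ (["unknown", "low", "medium", "high", "xhigh", "minimal", "small", "light", "cheap", "med", "normal", "standard", "balanced", "default", "large", "deep", "hard", "provider_reported_high", "x_high", "extra_high", "extrahigh", "very_high", "max", "maximum", "provider_reported_xhigh"] : List String)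
  · simp only [List.mem_cons, List.not_mem_nil, or_false] at h
    rcases h with rfl|rfl|rfl|rfl|rfl|rfl|rfl|rfl|rfl|rfl|rfl|rfl|rfl|rfl|rfl|rfl|rfl|rfl|rfl|rfl|rfl|rfl|rfl|rfl|rfl
    all_goals decide
  · simp only [List.mem_cons, List.not_mem_nil, or_false, not_or] at h
    obtain ⟨h0, h1, h2, h3, h4, h5, h6, h7, h8, h9, h10, h11, h12, h13, h14, h15, h16, h17, h18, h19, h20, h21, h22, h23, h24⟩ := h
    simp [branchRes, pvCanon, PySem.Dict.get?, PySem.Set.contains, EFFORT_LEVEL_VALUES,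
      LOW_EFFORT_TOKENS, MEDIUM_EFFORT_TOKENS, HIGH_EFFORT_TOKENS, XHIGH_EFFORT_TOKENS,
      h0, h1, h2, h3, h4, h5, h6, h7, h8, h9, h10, h11, h12, h13, h14, h15, h16, h17, h18, h19, h20, h21, h22, h23, h24, Ne.symm h0, Ne.symm h1, Ne.symm h2, Ne.symm h3, Ne.symm h4, Ne.symm h5, Ne.symm h6, Ne.symm h7, Ne.symm h8, Ne.symm h9, Ne.symm h10, Ne.symm h11, Ne.symm h12, Ne.symm h13, Ne.symm h14, Ne.symm h15, Ne.symm h16, Ne.symm h17, Ne.symm h18, Ne.symm h19, Ne.symm h20, Ne.symm h21, Ne.symm h22, Ne.symm h23, Ne.symm h24, beq_eq_false_iff_ne.mpr (Ne.symm h0), beq_eq_false_iff_ne.mpr (Ne.symm h1), beq_eq_false_iff_ne.mpr (Ne.symm h2), beq_eq_false_iff_ne.mpr (Ne.symm h3), beq_eq_false_iff_ne.mpr (Ne.symm h4), beq_eq_false_iff_ne.mpr (Ne.symm h5), beq_eq_false_iff_ne.mpr (Ne.symm h6), beq_eq_false_iff_ne.mpr (Ne.symm h7), beq_eq_false_iff_ne.mpr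 (Ne.symm h8), beq_eq_false_iff_ne.mpr (Ne.symm h9), beq_eq_false_iff_ne.mpr (Ne.symm h10), beq_eq_false_iff_ne.mpr (Ne.symm h11), beq_eq_false_iff_ne.mpr (Ne.symm h12), beq_eq_false_iff_ne.mpr (Ne.symm h13), beq_eq_false_iff_ne.mpr (Ne.symm h14), beq_eq_false_iff_ne.mpr (Ne.symm h15), beq_eq_false_iff_ne.mpr (Ne.symm h16), beq_eq_false_iff_ne.mpr (Ne.symm h17), beq_eq_false_iff_ne.mpr (Ne.symm h18), beq_eq_false_iff_ne.mpr (Ne.symm h19), beq_eq_false_iff_ne.mpr (Ne.symm h20), beq_eq_false_iff_ne.mpr (Ne.symm h21), beq_eq_false_iff_ne.mpr (Ne.symm h22), beq_eq_false_iff_ne.mpr (Ne.symm h23), beq_eq_false_iff_ne.mpr (Ne.symm h24), beq_eq_false_iff_ne.mpr h0, beq_eq_false_iff_ne.mpr h1, beq_eq_false_iff_ne.mpr h2, beq_eq_false_iff_ne.mpr h3, beq_eq_false_iff_ne.mpr h4, beq_eq_false_iff_ne.mpr h5, beq_eq_false_iff_ne.mpr h6, beq_eq_false_iff_ne.mpr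 h7, beq_eq_false_iff_ne.mpr h8, beq_eq_false_iff_ne.mpr h9, beq_eq_false_iff_ne.mpr h10, beq_eq_false_iff_ne.mpr h11, beq_eq_false_iff_ne.mpr h12, beq_eq_false_iff_ne.mpr h13, beq_eq_false_iff_ne.mpr h14, beq_eq_false_iff_ne.mpr h15, beq_eq_false_iff_ne.mpr h16, beq_eq_false_iff_ne.mpr h17, beq_eq_false_iff_ne.mpr h18, beq_eq_false_iff_ne.mpr h19, beq_eq_false_iff_ne.mpr h20, beq_eq_false_iff_ne.mpr h21, beq_eq_false_iff_ne.mpr h22, beq_eq_false_iff_ne.mpr h23, beq_eq_false_iff_ne.mpr h24, List.find?]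

theorem A_unfold (value : String) :
    normalize_effort_level value =
      (match branchRes (pyToken value) with
       | some r => r
       | none =>
         if PySem.Str.startswith (pyToken value) "provider_reported_" then
           normalize_effort_level (String.ofList ((pyToken value).toList.drop 18))
         else "unknown") := by
  rw [normalize_effort_level]
  unfold branchRes
  split_ifs <;> rfl

theorem A_eq_loop : ∀ (n : Nat) (value : String), value.toList.length ≤ n →
    normalize_effort_level value = pvLoop (pyToken value) := by
  intro n
  induction n using Nat.strong_induction_on with
  | _ n ih =>
  intro value hv
  rw [A_unfold, pvLoop, ← branchRes_eq_get?]
  cases hbr : branchRes (pyToken value) with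
  | some r => rfl
  | none =>
    simp only
    by_cases hsw : PySem.Str.startswith (pyToken value) "provider_reported_" = true
    · have hp : pvPrefix = "provider_reported_" := rfl
      have hsl : PySem.Chars.slice (pyToken value).toList (some 18) none =
          (pyToken value).toList.drop 18 := by
        unfold PySem.Chars.slice
        rw [PySem.List.slice_from _ (by norm_num)]
        rfl
      rw [hp, hsw, if_pos rfl, hsl]
      have h18 : (18 : Nat) ≤ (pyToken value).toList.length := by
        have := startswith_len_le (s := pyToken value) (p := "provider_reported_") hsw
        simpa using this
      have hlt : (String.ofList ((pyToken value).toList.drop 18)).toList.length < n := by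
        rw [String.toList_ofList, List.length_drop]
        have := pyToken_length_le value
        omega
      simpa using ih _ hlt (String.ofList ((pyToken value).toList.drop 18)) le_rfl
    · have hf : PySem.Str.startswith (pyToken value) "provider_reported_" = false :=
        Bool.eq_false_iff.mpr hsw
      rw [hf]
      simp at hf
      simp [hf, pvPrefix]

-- ===== VERDICT (by name: the statement is the Claim_ definition above) =====
theorem normalize_effort_level_spec : Claim_equal_normalize_effort_level := by
  intro value _
  unfold Spec_normalize_effort_level normalize_effort_level_alt
  exact A_eq_loop value.toList.length value le_rfl
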